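-- pv_equiv track=rewrite | github.com/luca2849/CM1103-Problem-Solving-With-Python | Coursework/coursework.py | series_score
-- ===== SOURCE A (Python) =====
-- def series_score(sailor_results, discard=1):
--     """
--     Takes a tuple of a sailor's name and their results and returns the total
--     of their places minus the lowest
--     e.g. ("bob", [2, 4, 1, 1, 2, 5]) would return 10 (2 + 4 + 1 + 1 + 2)
--     The function also takes an argument to cut off a given number of worst results,
--     defaulted to 1
--     """
--     #check if discard value is valid
--     if discard >= len(sailor_results[1]) or discard < 0:
--         return -1
--     #sort list and slice off required values
--     sorted_list = sorted(sailor_results[1])[:(len(sailor_results[1])-discard)]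
--     total = 0
--     #work out total for the sailor
--     for value in sorted_list:
--         total += value
--     #return total
--     return total
-- ===== SOURCE B (Python) =====
-- def series_score(sailor_results, discard=1):
--     results = sailor_results[1]
--     if discard >= len(results) or discard < 0:
--         return -1
--     # selection by repeated extraction: remove the current maximum `discard`
--     # times (no sorting), then sum what is left
--     remaining = list(results)
--     for _ in range(discard):
--         remaining.remove(max(remaining))
--     return sum(remaining)
-- ===== Notes on version B (the rewrite author's own statement) =====
-- stated objective: alternative
-- what changed: B never sorts: it works on a copy of the results, repeatedly extracts the current maximum `discard` times (selection by repeated extraction) and sums what remains, instead of A's ascending sort, slice and accumulation loop.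
import Mathlib
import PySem

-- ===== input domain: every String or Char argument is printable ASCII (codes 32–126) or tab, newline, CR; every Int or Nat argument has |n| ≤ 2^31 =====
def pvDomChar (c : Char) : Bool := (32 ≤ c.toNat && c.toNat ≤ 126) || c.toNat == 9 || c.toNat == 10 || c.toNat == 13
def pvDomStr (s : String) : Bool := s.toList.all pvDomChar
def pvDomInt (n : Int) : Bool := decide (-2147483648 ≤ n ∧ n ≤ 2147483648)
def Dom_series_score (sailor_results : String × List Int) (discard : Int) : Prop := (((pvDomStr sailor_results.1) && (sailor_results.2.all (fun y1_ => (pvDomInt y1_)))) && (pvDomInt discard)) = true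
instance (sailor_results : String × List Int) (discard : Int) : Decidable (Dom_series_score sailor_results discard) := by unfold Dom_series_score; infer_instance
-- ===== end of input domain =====

-- B never sorts: it copies the results, removes the current maximum `discard` times and sums the rest, replacing A's sort + slice + accumulation loop; objective: alternative (selection by repeated extraction).


-- ===== PORT A =====
def series_score (sailor_results : String × List Int) (discard : Int) : Int :=
  if discard ≥ (sailor_results.2.length : Int) ∨ discard < 0 then -1
  else
    let sorted_list := PySem.List.slice (PySem.List.sorted sailor_results.2 (fun x => x) false)
      none (some ((sailor_results.2.length : Int) - discard))
    sorted_list.foldl (fun total value => total + value) 0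

-- ===== PORT B =====
-- the `for _ in range(discard): remaining.remove(max(remaining))` loop of Source B
-- (max(remaining) raises on an empty list; inside the guard the list is never
-- empty, so the `none`/`getD` fallbacks of the port are never reached)
def removeMaxLoop (l : List Int) : Nat → List Int
  | 0 => l
  | k + 1 =>
    removeMaxLoop
      (match PySem.List.max? l (fun x => x) with
       | some m => (PySem.List.remove? l m).getD l
       | none => l) k

def series_score_alt (sailor_results : String × List Int) (discard : Int) : Int :=
  let results := sailor_results.2
  if discard ≥ (results.length : Int) ∨ discard < 0 then -1
  else (removeMaxLoop results discard.toNat).sum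

-- ===== PRECONDITION & SPEC =====
def Spec_series_score (sailor_results : String × List Int) (discard : Int) (out : Int) : Prop := out = series_score_alt sailor_results discard
instance (sailor_results : String × List Int) (discard : Int) (out : Int) : Decidable (Spec_series_score sailor_results discard out) := by unfold Spec_series_score; infer_instance

-- ===== CLAIM (what is proved, stated in full; the proofs are below) =====
def Claim_equal_series_score : Prop := ∀ (sailor_results : String × List Int) (discard : Int), Dom_series_score sailor_results discard → Spec_series_score sailor_results discard (series_score sailor_results discard)

-- ===== LEMMAS AND PROOFS =====

-- after k removals of the maximum, the multiset left is the first length-k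
-- elements of the ascending sort, hence the sums agree
lemma removeMaxLoop_sum (k : Nat) : ∀ (l s : List Int), l.Perm s → s.Pairwise (· ≤ ·) →
    k ≤ l.length → (removeMaxLoop l k).sum = (s.take (s.length - k)).sum := by
  induction k with
  | zero =>
    intro l s hp _ _
    simp [removeMaxLoop, hp.sum_eq]
  | succ k ih =>
    intro l s hp hs hk
    have hl : l ≠ [] := by
      intro h; subst h; simp at hk
    obtain ⟨m, hm⟩ : ∃ m, PySem.List.max? l (fun x => x) = some m := by
      cases h : PySem.List.max? l (fun x => x) with
      | none => exact absurd ((PySem.List.max?_eq_none_iff l (fun x => x)).mp h) hl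
      | some m => exact ⟨m, rfl⟩
    have hmem : m ∈ l := PySem.List.max?_mem hm
    have hmax : ∀ y ∈ l, y ≤ m := fun y hy => PySem.List.max?_isMax hm y hy
    have hrm : PySem.List.remove? l m = some (l.erase m) :=
      PySem.List.remove?_eq_some_erase l m hmem
    have hstep : removeMaxLoop l (k + 1) = removeMaxLoop (l.erase m) k := by
      simp [removeMaxLoop, hm, hrm]
    have hsne : s ≠ [] := by
      intro h; subst h; exact hl (List.Perm.eq_nil hp)
    -- s = dropLast ++ [last], and last = m
    have hsplit : s.dropLast ++ [s.getLast hsne] = s := List.dropLast_append_getLast hsne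
    have hlast_le : s.getLast hsne ≤ m := hmax _ (hp.symm.mem_iff.mp (List.getLast_mem hsne))
    have hle_last : m ≤ s.getLast hsne := by
      have hms : m ∈ s := hp.mem_iff.mp hmem
      rw [← hsplit] at hms hs
      rcases List.mem_append.mp hms with h | h
      · exact (List.pairwise_append.mp hs).2.2 m h _ (by simp)
      · simp at h; omega
    have hlm : s.getLast hsne = m := le_antisymm hlast_le hle_last
    have hperm' : (l.erase m).Perm s.dropLast := by
      have h1 : s.Perm (m :: l.erase m) := hp.symm.trans (List.perm_cons_erase hmem)
      have h2 : s.Perm (m :: s.dropLast) := by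
        conv_lhs => rw [← hsplit]
        rw [hlm]; exact List.perm_append_singleton _ _
      exact (h1.symm.trans h2).cons_inv
    have hsorted' : s.dropLast.Pairwise (· ≤ ·) := List.Pairwise.sublist (List.dropLast_sublist s) hs
    have hlen : (l.erase m).length = l.length - 1 := List.length_erase_of_mem hmem
    have := ih (l.erase m) s.dropLast hperm' hsorted' (by omega)
    rw [hstep, this]
    have hslen : s.length = l.length := hp.length_eq.symm
    have hdl : s.dropLast.length = s.length - 1 := List.length_dropLast
    have h1 : s.length - (k + 1) ≤ s.dropLast.length := by rw [hdl]; omega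
    have he : s.dropLast.length - k = s.length - (k + 1) := by rw [hdl]; omega
    have h2 : s.take (s.length - (k + 1)) = s.dropLast.take (s.length - (k + 1)) := by
      have h3 := List.take_append_of_le_length (l₂ := [s.getLast hsne]) h1
      rw [hsplit] at h3; exact h3
    rw [he, h2]

-- ===== VERDICT (by name: the statement is the Claim_ definition above) =====
theorem series_score_spec : Claim_equal_series_score := by
  intro sr d _
  by_cases h : d ≥ (sr.2.length : Int) ∨ d < 0
  · simp [Spec_series_score, series_score, series_score_alt, h]
  · simp only [Spec_series_score, series_score, series_score_alt, if_neg h]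
    set s := PySem.List.sorted sr.2 (fun x => x) false with hsdef
    have hperm : sr.2.Perm s := (PySem.List.sorted_perm sr.2 _ false).symm
    have hsorted : s.Pairwise (· ≤ ·) := by
      simpa using PySem.List.sorted_pairwise sr.2 (fun x => x)
    have hlen : s.length = sr.2.length := PySem.List.length_sorted _ _ _
    rw [PySem.List.slice_to _ (by omega)]
    have hfold : ∀ (l : List Int), l.foldl (fun total value => total + value) 0 = l.sum := by
      intro l; simpa using PySem.List.foldl_add l (fun x => x) 0
    rw [hfold]
    have hk : d.toNat ≤ sr.2.length := by omega
    simp only [not_or, not_le, not_lt] at h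
    rw [removeMaxLoop_sum d.toNat sr.2 s hperm hsorted hk]
    have he : ((sr.2.length : Int) - d).toNat = s.length - d.toNat := by omega
    rw [he]
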